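-- pv_equiv track=rewrite | github.com/ZZFlying/PARFuMS | sub/fr-hit_link_light.py | update_link_threshold
-- ===== SOURCE A (Python) =====
-- def update_link_threshold(links):
--     threshold = 5
--     thresholds = [5, 10, 20, 40, 60, 80, 100]
--     for threshold in thresholds:
--         link_count = 0
--         for link_seq in links.values():
--             for count in link_seq.values():
--                 if count > threshold:
--                     link_count += 1
--         if link_count < 40:
--             break
--     return threshold
-- ===== SOURCE B (Python) =====
-- def update_link_threshold(links):
--     thresholds = [5, 10, 20, 40, 60, 80, 100]
--     counts = sorted(c for seq in links.values() for c in seq.values())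
--     n = len(counts)
--     i = 0
--     for t in thresholds:
--         while i < n and counts[i] <= t:
--             i += 1
--         if n - i < 40:
--             return t
--     return 100
-- ===== Notes on version B (the rewrite author's own statement) =====
-- stated objective: alternative
-- what changed: B flattens all counts once, sorts them, and sweeps the increasing thresholds with a single advancing pointer over the sorted list (each count is inspected O(1) times), instead of A's full re-scan of every inner dict for every threshold.
import Mathlib
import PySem

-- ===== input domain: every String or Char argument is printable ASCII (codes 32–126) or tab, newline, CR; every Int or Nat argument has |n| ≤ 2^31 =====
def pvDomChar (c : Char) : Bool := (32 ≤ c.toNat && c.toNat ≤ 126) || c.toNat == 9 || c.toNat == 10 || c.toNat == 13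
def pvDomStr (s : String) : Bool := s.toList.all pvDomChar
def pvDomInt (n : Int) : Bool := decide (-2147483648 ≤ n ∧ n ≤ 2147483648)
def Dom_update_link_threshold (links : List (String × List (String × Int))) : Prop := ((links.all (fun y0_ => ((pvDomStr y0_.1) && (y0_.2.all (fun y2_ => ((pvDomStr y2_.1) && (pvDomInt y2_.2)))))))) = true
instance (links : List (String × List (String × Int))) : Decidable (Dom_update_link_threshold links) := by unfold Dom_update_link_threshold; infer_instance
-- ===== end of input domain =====

-- B replaces A's per-threshold full re-scan of all inner counts by one flatten + sort and a
-- single advancing pointer over the sorted counts (ported as dropping a prefix) — alternative algorithm.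

-- ===== PORT A =====
-- the nested 'for link_seq in links.values(): for count in link_seq.values(): if count > threshold: link_count += 1'
def pvCountA (links : List (String × List (String × Int))) (th : Int) : Int :=
  links.foldl (fun acc p => p.2.foldl (fun a q => if q.2 > th then a + 1 else a) acc) 0

-- 'for threshold in thresholds: … if link_count < 40: break' + final 'return threshold'
def pvLoopA (links : List (String × List (String × Int))) : List Int → Int → Int
  | [], threshold => threshold
  | th :: rest, _ => if pvCountA links th < 40 then th else pvLoopA links rest th

def update_link_threshold (links : List (String × List (String × Int))) : Int :=
  pvLoopA links [5, 10, 20, 40, 60, 80, 100] 5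

-- ===== PORT B =====
-- B's 'while i < n and counts[i] <= t: i += 1' : the kept part of counts is its suffix from i,
-- so the advancing pointer is ported as dropping the prefix of elements ≤ t (n - i = length of suffix)
def pvDropLE (t : Int) : List Int → List Int
  | [] => []
  | c :: rest => if c ≤ t then pvDropLE t rest else c :: rest

-- B's 'for t in thresholds: …advance i…; if n - i < 40: return t' / fallthrough 'return 100'
def pvLoopB : List Int → List Int → Int
  | _, [] => 100
  | rest, t :: ts =>
    let rest' := pvDropLE t rest
    if rest'.length < 40 then t else pvLoopB rest' ts

def update_link_threshold_alt (links : List (String × List (String × Int))) : Int :=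
  pvLoopB (PySem.List.sorted (links.flatMap fun p => p.2.map Prod.snd) (fun c => c) false)
    [5, 10, 20, 40, 60, 80, 100]

-- ===== PRECONDITION & SPEC =====
def Spec_update_link_threshold (links : List (String × List (String × Int))) (out : Int) : Prop := out = update_link_threshold_alt links
instance (links : List (String × List (String × Int))) (out : Int) : Decidable (Spec_update_link_threshold links out) := by unfold Spec_update_link_threshold; infer_instance

-- ===== CLAIM (what is proved, stated in full; the proofs are below) =====
def Claim_equal_update_link_threshold : Prop := ∀ (links : List (String × List (String × Int))), Dom_update_link_threshold links → Spec_update_link_threshold links (update_link_threshold links)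

-- ===== LEMMAS AND PROOFS =====

-- A's loop with its count rewritten as a countP over the flattened counts
def pvLoopA' (s : List Int) : List Int → Int → Int
  | [], threshold => threshold
  | th :: rest, _ =>
    if (s.countP (fun c => decide (th < c)) : Int) < 40 then th else pvLoopA' s rest th

theorem pvCountA_eq (links : List (String × List (String × Int))) (th : Int) :
    pvCountA links th
      = ((links.flatMap fun p => p.2.map Prod.snd).countP (fun c => decide (th < c)) : Int) := by
  unfold pvCountA
  have outer : ∀ (ls : List (String × List (String × Int))) (a : Int),
      ls.foldl (fun acc p => p.2.foldl (fun a q => if q.2 > th then a + 1 else a) acc) a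
        = a + ((ls.flatMap fun p => p.2.map Prod.snd).countP (fun c => decide (th < c)) : Int) := by
    intro ls
    induction ls with
    | nil => simp
    | cons q qs ih2 =>
      intro a
      simp only [List.foldl_cons, List.flatMap_cons, List.countP_append]
      have hin := PySem.List.foldl_ite_add_one (fun r : String × Int => r.2 > th) q.2 a
      rw [hin, ih2]
      have hmap : (q.2.map Prod.snd).countP (fun c => decide (th < c))
          = q.2.countP (fun r => decide (r.2 > th)) := by
        rw [List.countP_map]; rfl
      rw [hmap]
      push_cast
      ring
  simpa using outer links 0

theorem pvLoopA_eq (links : List (String × List (String × Int))) (ts : List Int) (last : Int) :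
    pvLoopA links ts last = pvLoopA' (links.flatMap fun p => p.2.map Prod.snd) ts last := by
  induction ts generalizing last with
  | nil => rfl
  | cons t ts ih => simp only [pvLoopA, pvLoopA', pvCountA_eq, ih]

theorem pvLoopA'_perm {s s' : List Int} (h : s.Perm s') (ts : List Int) (last : Int) :
    pvLoopA' s ts last = pvLoopA' s' ts last := by
  induction ts generalizing last with
  | nil => rfl
  | cons t ts ih => simp only [pvLoopA', h.countP_eq, ih]

theorem pvDropLE_eq_filter (t : Int) :
    ∀ (s : List Int), s.Pairwise (· ≤ ·) → pvDropLE t s = s.filter (fun c => decide (t < c)) := by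
  intro s hs
  induction s with
  | nil => rfl
  | cons a s ih =>
    rcases List.pairwise_cons.mp hs with ⟨ha, hs'⟩
    by_cases h : a ≤ t
    · have : ¬ t < a := not_lt.mpr h
      simp [pvDropLE, h, this, ih hs']
    · have hta : t < a := lt_of_not_ge h
      have hall : s.filter (fun c => decide (t < c)) = s :=
        List.filter_eq_self.mpr (fun x hx => decide_eq_true (lt_of_lt_of_le hta (ha x hx)))
      simp [pvDropLE, h, hta, hall]

theorem pvFilter_swallow (s : List Int) {t' t : Int} (h : t' ≤ t) :
    (s.filter (fun c => decide (t' < c))).filter (fun c => decide (t < c))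
      = s.filter (fun c => decide (t < c)) := by
  rw [List.filter_filter]
  refine List.filter_congr ?_
  intro a _
  by_cases hc : t < a
  · have : t' < a := lt_of_le_of_lt h hc
    simp [hc, this]
  · simp [hc]

-- the loop equivalence, with B's remaining list given as a filter of the sorted list
theorem pvLoop_eq (ts : List Int) :
    ∀ (s : List Int) (prev last : Int), s.Pairwise (· ≤ ·) →
      (prev :: ts).Pairwise (· ≤ ·) → ts.getLastD last = 100 →
      pvLoopB (s.filter (fun c => decide (prev < c))) ts = pvLoopA' s ts last := by
  induction ts with
  | nil =>
    intro s prev last _ _ hlast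
    simpa [pvLoopB, pvLoopA'] using hlast.symm
  | cons t ts ih =>
    intro s prev last hs hchain hlast
    rcases List.pairwise_cons.mp hchain with ⟨hall, htail⟩
    have hpt : prev ≤ t := hall t List.mem_cons_self
    have hdrop : pvDropLE t (s.filter (fun c => decide (prev < c)))
        = s.filter (fun c => decide (t < c)) := by
      rw [pvDropLE_eq_filter t _ (hs.filter _), pvFilter_swallow s hpt]
    have hcond : ((s.filter (fun c => decide (t < c))).length < 40)
        ↔ ((s.countP (fun c => decide (t < c)) : Int) < 40) := by
      rw [List.countP_eq_length_filter]
      exact_mod_cast Iff.rfl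
    have hlast' : ts.getLastD t = 100 := by
      rwa [List.getLastD_cons] at hlast
    simp only [pvLoopB, pvLoopA', hdrop]
    by_cases hb : (s.filter (fun c => decide (t < c))).length < 40
    · simp [hb, hcond.mp hb]
    · have ha : ¬ (s.countP (fun c => decide (t < c)) : Int) < 40 := fun h => hb (hcond.mpr h)
      simp only [if_neg hb, if_neg ha]
      exact ih s t t hs htail hlast'

-- ===== VERDICT (by name: the statement is the Claim_ definition above) =====
theorem update_link_threshold_spec : Claim_equal_update_link_threshold := by
  intro links hdom
  unfold Spec_update_link_threshold update_link_threshold update_link_threshold_alt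
  have hperm : (PySem.List.sorted (links.flatMap fun p => p.2.map Prod.snd) (fun c => c) false).Perm
      (links.flatMap fun p => p.2.map Prod.snd) :=
    PySem.List.sorted_perm (links.flatMap fun p => p.2.map Prod.snd) (fun c => c) false
  have hpw : (PySem.List.sorted (links.flatMap fun p => p.2.map Prod.snd) (fun c => c) false).Pairwise (· ≤ ·) := by
    simpa using PySem.List.sorted_pairwise (links.flatMap fun p => p.2.map Prod.snd) (fun c => c)
  -- every count in the flattened list is above -2^31 - 1 (from the input domain), so the
  -- initial remaining list of B is the whole sorted list, seen as a filter with prev = -2147483649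
  have hbound : ∀ c ∈ PySem.List.sorted (links.flatMap fun p => p.2.map Prod.snd) (fun c => c) false,
      (-2147483649 : Int) < c := by
    intro c hc
    have hcf : c ∈ links.flatMap fun p => p.2.map Prod.snd := hperm.mem_iff.mp hc
    rcases List.mem_flatMap.mp hcf with ⟨p, hp, hcp⟩
    rcases List.mem_map.mp hcp with ⟨q, hq, rfl⟩
    unfold Dom_update_link_threshold at hdom
    simp only [List.all_eq_true, Bool.and_eq_true] at hdom
    have hdq := ((hdom p hp).2 q hq).2
    unfold pvDomInt at hdq
    simp only [decide_eq_true_eq] at hdq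
    omega
  have hfill : (PySem.List.sorted (links.flatMap fun p => p.2.map Prod.snd) (fun c => c) false).filter
      (fun c => decide ((-2147483649 : Int) < c))
      = PySem.List.sorted (links.flatMap fun p => p.2.map Prod.snd) (fun c => c) false :=
    List.filter_eq_self.mpr (fun c hc => decide_eq_true (hbound c hc))
  have h := pvLoop_eq [5, 10, 20, 40, 60, 80, 100]
    (PySem.List.sorted (links.flatMap fun p => p.2.map Prod.snd) (fun c => c) false)
    (-2147483649) 5 hpw (by decide) (by decide)
  rw [hfill] at h
  rw [pvLoopA_eq, pvLoopA'_perm hperm.symm]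
  exact h.symm
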